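-- pv_equiv track=rewrite | github.com/khoruzhii/Heuristic-Sum-of-Squares | transformer/src/loader/oracle.py | _extract_basis_from_output
-- ===== SOURCE A (Python) =====
-- from typing import List, Tuple, Optional
--
-- def _extract_basis_from_output(output_string: str) -> List[str]:
--     """
--     Extract basis monomials from the model output string.
--     This is a simplified extraction - adjust based on your actual output format.
--
--     Args:
--         output_string (str): Model output string
--
--     Returns:
--         List[str]: List of basis monomial strings
--     """
--     # Split by common separators and extract monomials
--     # This is a basic implementation - you may need to adjust based on your output format
--     tokens = output_string.split()
--     basis = []
--
--     # Simple extraction: look for patterns that look like monomials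
--     # Adjust this based on your actual output format
--     current_monomial = []
--     for token in tokens:
--         if token.startswith('C') or token.startswith('E'):
--             current_monomial.append(token)
--         elif token == '+':
--             if current_monomial:
--                 basis.append(" ".join(current_monomial))
--                 current_monomial = []
--         else:
--             # Handle other tokens as needed
--             pass
--
--     # Don't forget the last monomial
--     if current_monomial:
--         basis.append(" ".join(current_monomial))
--
--     return basis
-- ===== SOURCE B (Python) =====
-- from typing import List
--
--
-- def _split_on_plus(tokens: List[str]) -> List[List[str]]:
--     """Partition tokens into segments delimited by standalone '+' tokens."""
--     segments = []
--     segment = []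
--     for t in tokens:
--         if t == '+':
--             segments.append(segment)
--             segment = []
--         else:
--             segment.append(t)
--     segments.append(segment)
--     return segments
--
--
-- def _extract_basis_from_output(output_string: str) -> List[str]:
--     basis = []
--     for segment in _split_on_plus(output_string.split()):
--         monomial = [t for t in segment if t.startswith('C') or t.startswith('E')]
--         if monomial:
--             basis.append(" ".join(monomial))
--     return basis
-- ===== Notes on version B (the rewrite author's own statement) =====
-- stated objective: alternative
-- what changed: Replaces A's single accumulator loop (collect tokens, flush at each plus-sign separator token) by a group-first structure: partition the token list into segments delimited by plus-sign tokens, then filter each segment to C/E-prefixed tokens and join the non-empty ones.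
import Mathlib
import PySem

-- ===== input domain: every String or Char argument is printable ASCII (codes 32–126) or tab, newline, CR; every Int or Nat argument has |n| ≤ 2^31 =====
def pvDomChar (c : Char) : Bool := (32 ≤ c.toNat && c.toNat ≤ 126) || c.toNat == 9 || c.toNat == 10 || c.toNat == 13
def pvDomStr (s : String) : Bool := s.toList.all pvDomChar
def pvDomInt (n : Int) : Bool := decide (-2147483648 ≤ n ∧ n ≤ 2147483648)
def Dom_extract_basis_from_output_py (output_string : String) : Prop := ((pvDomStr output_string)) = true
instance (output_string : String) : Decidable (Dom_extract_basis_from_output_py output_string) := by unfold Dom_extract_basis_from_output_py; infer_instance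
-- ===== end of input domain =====

-- B replaces A's flush-on-'+' accumulator loop by: split tokens into '+'-delimited segments, filter each to C/E tokens, join the non-empty ones (alternative decomposition, same cost).

-- ===== PORT A =====
-- A's token predicate: token.startswith('C') or token.startswith('E')
def pvIsCE (t : String) : Bool :=
  PySem.Str.startswith t "C" || PySem.Str.startswith t "E"

def extract_basis_from_output_py (output_string : String) : List String :=
  let tokens := PySem.Str.split₀ output_string
  let st := tokens.foldl (fun (st : List String × List String) token =>
    if pvIsCE token then
      (st.1, st.2 ++ [token])
    else if token == "+" then
      (if st.2 ≠ [] then (st.1 ++ [PySem.Str.join " " st.2], []) else st)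
    else st) ([], [])
  if st.2 ≠ [] then st.1 ++ [PySem.Str.join " " st.2] else st.1

-- ===== PORT B =====
-- _split_on_plus from Source B: partition tokens into '+'-delimited segments
def pvSplitOnPlus (tokens : List String) : List (List String) :=
  let st := tokens.foldl (fun (st : List (List String) × List String) t =>
    if t == "+" then (st.1 ++ [st.2], []) else (st.1, st.2 ++ [t])) ([], [])
  st.1 ++ [st.2]

def extract_basis_from_output_py_alt (output_string : String) : List String :=
  (pvSplitOnPlus (PySem.Str.split₀ output_string)).foldl (fun basis segment =>
    let monomial := segment.filter pvIsCE
    if monomial ≠ [] then basis ++ [PySem.Str.join " " monomial] else basis) []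

-- ===== PRECONDITION & SPEC =====
def Spec_extract_basis_from_output_py (output_string : String) (out : List String) : Prop := out = extract_basis_from_output_py_alt output_string
instance (output_string : String) (out : List String) : Decidable (Spec_extract_basis_from_output_py output_string out) := by unfold Spec_extract_basis_from_output_py; infer_instance

-- ===== CLAIM (what is proved, stated in full; the proofs are below) =====
def Claim_equal_extract_basis_from_output_py : Prop := ∀ (output_string : String), Dom_extract_basis_from_output_py output_string → Spec_extract_basis_from_output_py output_string (extract_basis_from_output_py output_string)

-- ===== LEMMAS AND PROOFS =====

-- recursive view of the segment structure, used to relate the two folds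
def pvSegs (seg : List String) : List String → List (List String)
  | [] => [seg]
  | t :: ts => if t = "+" then seg :: pvSegs [] ts else pvSegs (seg ++ [t]) ts

-- shared recursive specification both programs are proved equal to
def pvSpec (cur : List String) : List String → List String
  | [] => if cur ≠ [] then [PySem.Str.join " " cur] else []
  | t :: ts =>
      if pvIsCE t then pvSpec (cur ++ [t]) ts
      else if t = "+" then
        (if cur ≠ [] then PySem.Str.join " " cur :: pvSpec [] ts else pvSpec [] ts)
      else pvSpec cur ts

lemma pvA_loop (ts : List String) : ∀ (basis cur : List String),
    (let st := ts.foldl (fun (st : List String × List String) token =>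
      if pvIsCE token then (st.1, st.2 ++ [token])
      else if token == "+" then
        (if st.2 ≠ [] then (st.1 ++ [PySem.Str.join " " st.2], []) else st)
      else st) (basis, cur);
     if st.2 ≠ [] then st.1 ++ [PySem.Str.join " " st.2] else st.1)
    = basis ++ pvSpec cur ts := by
  induction ts with
  | nil =>
      intro basis cur
      simp only [List.foldl, pvSpec]
      split <;> simp_all
  | cons t ts ih =>
      intro basis cur
      simp only [List.foldl, pvSpec]
      by_cases hp : pvIsCE t
      · simpa [hp] using ih basis (cur ++ [t])
      · by_cases hplus : t = "+"
        · by_cases hc : cur ≠ []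
          · simpa [hp, hplus, hc] using ih (basis ++ [PySem.Str.join " " cur]) []
          · simp only [not_not] at hc
            simpa [hp, hplus, hc] using ih basis []
        · simpa [hp, hplus] using ih basis cur

lemma pvSplit_loop (ts : List String) : ∀ (segs : List (List String)) (seg : List String),
    (let st := ts.foldl (fun (st : List (List String) × List String) t =>
      if t == "+" then (st.1 ++ [st.2], []) else (st.1, st.2 ++ [t])) (segs, seg);
     st.1 ++ [st.2]) = segs ++ pvSegs seg ts := by
  induction ts with
  | nil => intro segs seg; simp [pvSegs]
  | cons t ts ih =>
      intro segs seg
      simp only [List.foldl, pvSegs]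
      by_cases h : t = "+"
      · simpa [h] using ih (segs ++ [seg]) []
      · simpa [h] using ih segs (seg ++ [t])

lemma pvIsCE_plus : pvIsCE "+" = false := by decide

lemma pvB_loop (ts : List String) : ∀ (basis cur : List String),
    (pvSegs cur ts).foldl (fun basis segment =>
      let monomial := segment.filter pvIsCE
      if monomial ≠ [] then basis ++ [PySem.Str.join " " monomial] else basis) basis
    = basis ++ pvSpec (cur.filter pvIsCE) ts := by
  induction ts with
  | nil =>
      intro basis cur
      simp only [pvSegs, List.foldl, pvSpec]
      split <;> simp_all
  | cons t ts ih =>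
      intro basis cur
      by_cases hplus : t = "+"
      · subst hplus
        rw [show pvSegs cur ("+" :: ts) = cur :: pvSegs [] ts from by simp [pvSegs]]
        rw [List.foldl_cons, ih]
        show (if cur.filter pvIsCE ≠ [] then basis ++ [PySem.Str.join " " (cur.filter pvIsCE)]
              else basis) ++ pvSpec (List.filter pvIsCE []) ts
           = basis ++ pvSpec (cur.filter pvIsCE) ("+" :: ts)
        by_cases hc : cur.filter pvIsCE = [] <;>
          simp [pvSpec, hc, pvIsCE_plus]
      · rw [show pvSegs cur (t :: ts) = pvSegs (cur ++ [t]) ts from by simp [pvSegs, hplus]]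
        rw [ih]
        by_cases hp : pvIsCE t <;>
          simp [pvSpec, hp, hplus, List.filter_append]

-- ===== VERDICT (by name: the statement is the Claim_ definition above) =====
theorem extract_basis_from_output_py_spec : Claim_equal_extract_basis_from_output_py := by
  intro s _
  show extract_basis_from_output_py s = extract_basis_from_output_py_alt s
  have hA := pvA_loop (PySem.Str.split₀ s) [] []
  have hS := pvSplit_loop (PySem.Str.split₀ s) [] []
  have hB := pvB_loop (PySem.Str.split₀ s) [] []
  simp only [extract_basis_from_output_py, extract_basis_from_output_py_alt, pvSplitOnPlus]
  simp only [List.nil_append] at hA hS hB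
  rw [hA, hS, hB]
  simp
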